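-- pv_equiv track=rewrite | github.com/Jingkzhou/python_data_lineage | main_to_csv.py | _split_values_groups
-- ===== SOURCE A (Python) =====
-- def _split_values_groups(values_section: str) -> list[str]:
--     text = values_section.strip()
--     if text.endswith(';'):
--         text = text[:-1].rstrip()
--     groups = []
--     current = []
--     depth = 0
--     in_single = False
--     in_double = False
--     i = 0
--     length = len(text)
--     while i < length:
--         ch = text[i]
--         if ch == "'" and not in_double:
--             current.append(ch)
--             if in_single and i + 1 < length and text[i + 1] == "'":
--                 i += 1
--                 current.append(text[i])
--             else:
--                 in_single = not in_single
--             i += 1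
--             continue
--         if ch == '"' and not in_single:
--             current.append(ch)
--             if in_double and i + 1 < length and text[i + 1] == '"':
--                 i += 1
--                 current.append(text[i])
--             else:
--                 in_double = not in_double
--             i += 1
--             continue
--         if not in_single and not in_double:
--             if ch == '(':
--                 depth += 1
--             elif ch == ')':
--                 depth = max(depth - 1, 0)
--             elif ch == ',' and depth == 0:
--                 groups.append(''.join(current).strip())
--                 current = []
--                 i += 1
--                 while i < length and text[i].isspace():
--                     i += 1
--                 continue
--         current.append(ch)
--         i += 1
--     if current:
--         groups.append(''.join(current).strip())
--     return [grp for grp in groups if grp]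
-- ===== SOURCE B (Python) =====
-- def _split_values_groups(values_section: str) -> list[str]:
--     text = values_section.strip()
--     if text.endswith(';'):
--         text = text[:-1].rstrip()
--     n = len(text)
--     # pass 1: record the index of every top-level comma
--     cuts = []
--     in_single = False
--     in_double = False
--     depth = 0
--     i = 0
--     while i < n:
--         ch = text[i]
--         if ch == "'" and not in_double:
--             if in_single and i + 1 < n and text[i + 1] == "'":
--                 i += 2
--             else:
--                 in_single = not in_single
--                 i += 1
--         elif ch == '"' and not in_single:
--             if in_double and i + 1 < n and text[i + 1] == '"':
--                 i += 2
--             else: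
--                 in_double = not in_double
--                 i += 1
--         else:
--             if not in_single and not in_double:
--                 if ch == '(':
--                     depth += 1
--                 elif ch == ')':
--                     depth = max(depth - 1, 0)
--                 elif ch == ',' and depth == 0:
--                     cuts.append(i)
--             i += 1
--     # pass 2: slice between the cuts, strip, keep the non-empty pieces
--     parts = []
--     prev = 0
--     for c in cuts:
--         parts.append(text[prev:c].strip())
--         prev = c + 1
--     parts.append(text[prev:].strip())
--     return [p for p in parts if p]
-- ===== Notes on version B (the rewrite author's own statement) =====
-- stated objective: alternative
-- what changed: Instead of accumulating a character buffer and emitting groups during the scan (with a post-comma whitespace-skip loop), B's scan only records the indices of top-level commas and a second pass slices the text between cuts and strips each slice; the buffer and the whitespace-skip loop disappear.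
import Mathlib
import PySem

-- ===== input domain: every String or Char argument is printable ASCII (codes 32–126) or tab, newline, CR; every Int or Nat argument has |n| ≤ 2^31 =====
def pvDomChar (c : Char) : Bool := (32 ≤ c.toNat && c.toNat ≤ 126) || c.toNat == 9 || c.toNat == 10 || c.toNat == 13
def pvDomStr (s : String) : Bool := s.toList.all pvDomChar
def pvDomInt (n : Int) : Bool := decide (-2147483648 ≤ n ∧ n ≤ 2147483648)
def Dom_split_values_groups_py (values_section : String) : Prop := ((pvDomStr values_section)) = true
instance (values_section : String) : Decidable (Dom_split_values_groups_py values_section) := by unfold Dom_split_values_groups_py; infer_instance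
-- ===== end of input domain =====

-- B records top-level comma indices in one scan and slices/strips in a second pass,
-- instead of A's in-scan character buffer with a post-comma whitespace-skip loop (objective: alternative decomposition).

-- ===== PORT A =====
-- shared preprocessing (identical three lines in both Pythons):
-- text = values_section.strip(); if text.endswith(';'): text = text[:-1].rstrip()
def spgText (values_section : String) : List Char :=
  let t := PySem.Chars.strip values_section.toList
  if PySem.Chars.endswith t [';'] then
    PySem.Chars.rstrip (PySem.Chars.slice t none (some (-1)))
  else t

-- inner `while i < length and text[i].isspace(): i += 1` loop of A, on the remaining suffix
def spgSkipWs : List Char → List Char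
  | [] => []
  | c :: rest => if PySem.Chars.isspace c then spgSkipWs rest else c :: rest

theorem spgSkipWs_length_le : ∀ (l : List Char), (spgSkipWs l).length ≤ l.length := by
  intro l
  induction l with
  | nil => simp [spgSkipWs]
  | cons c rest ih => by_cases h : PySem.Chars.isspace c <;> simp [spgSkipWs, h] <;> omega

-- A's main while loop: groups are kept as List (List Char) (strings via String.ofList at the end)
def spgLoopA : List Char → Bool → Bool → Nat → List Char → List (List Char) → List (List Char)
  | [], _, _, _, cur, groups => if cur ≠ [] then groups ++ [PySem.Chars.strip cur] else groups
  | ch :: rest, inS, inD, depth, cur, groups =>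
    if ch == '\'' && !inD then
      if inS && rest.head? == some '\'' then
        spgLoopA rest.tail inS inD depth (cur ++ [ch, '\'']) groups
      else
        spgLoopA rest (!inS) inD depth (cur ++ [ch]) groups
    else if ch == '"' && !inS then
      if inD && rest.head? == some '"' then
        spgLoopA rest.tail inS inD depth (cur ++ [ch, '"']) groups
      else
        spgLoopA rest inS (!inD) depth (cur ++ [ch]) groups
    else if !inS && !inD then
      if ch == '(' then spgLoopA rest inS inD (depth + 1) (cur ++ [ch]) groups
      else if ch == ')' then spgLoopA rest inS inD (depth - 1) (cur ++ [ch]) groups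
      else if ch == ',' && depth == 0 then
        spgLoopA (spgSkipWs rest) inS inD depth [] (groups ++ [PySem.Chars.strip cur])
      else spgLoopA rest inS inD depth (cur ++ [ch]) groups
    else spgLoopA rest inS inD depth (cur ++ [ch]) groups
  termination_by l => l.length
  decreasing_by all_goals first
    | (simp; have := List.length_tail_le (l := rest); omega)
    | (simp; have := spgSkipWs_length_le rest; omega)
    | simp

def split_values_groups_py (values_section : String) : List String :=
  let text := spgText values_section
  ((spgLoopA text false false 0 [] []).filter (fun g => !g.isEmpty)).map String.ofList

-- ===== PORT B =====
-- pass 1 of B: scan with the same state machine but only record top-level comma indices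
def spgScanB : List Char → Nat → Bool → Bool → Nat → List Nat
  | [], _, _, _, _ => []
  | ch :: rest, i, inS, inD, depth =>
    if ch == '\'' && !inD then
      if inS && rest.head? == some '\'' then spgScanB rest.tail (i + 2) inS inD depth
      else spgScanB rest (i + 1) (!inS) inD depth
    else if ch == '"' && !inS then
      if inD && rest.head? == some '"' then spgScanB rest.tail (i + 2) inS inD depth
      else spgScanB rest (i + 1) inS (!inD) depth
    else if !inS && !inD then
      if ch == '(' then spgScanB rest (i + 1) inS inD (depth + 1)
      else if ch == ')' then spgScanB rest (i + 1) inS inD (depth - 1)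
      else if ch == ',' && depth == 0 then i :: spgScanB rest (i + 1) inS inD depth
      else spgScanB rest (i + 1) inS inD depth
    else spgScanB rest (i + 1) inS inD depth
  termination_by l => l.length
  decreasing_by all_goals first
    | (simp; have := List.length_tail_le (l := rest); omega)
    | simp

-- pass 2 of B: text[prev:c].strip() between consecutive cuts (indices are ≥ 0, so slices use Nat casts)
def spgPieces (t : List Char) : List Nat → Nat → List (List Char)
  | [], prev => [PySem.Chars.strip (PySem.Chars.slice t (some (prev : Int)) none)]
  | c :: cs, prev =>
      PySem.Chars.strip (PySem.Chars.slice t (some (prev : Int)) (some (c : Int))) :: spgPieces t cs (c + 1)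

def split_values_groups_py_alt (values_section : String) : List String :=
  let text := spgText values_section
  ((spgPieces text (spgScanB text 0 false false 0) 0).filter (fun g => !g.isEmpty)).map String.ofList

-- ===== PRECONDITION & SPEC =====
def Spec_split_values_groups_py (values_section : String) (out : List String) : Prop := out = split_values_groups_py_alt values_section
instance (values_section : String) (out : List String) : Decidable (Spec_split_values_groups_py values_section out) := by unfold Spec_split_values_groups_py; infer_instance

-- ===== CLAIM (what is proved, stated in full; the proofs are below) =====
def Claim_equal_split_values_groups_py : Prop := ∀ (values_section : String), Dom_split_values_groups_py values_section → Spec_split_values_groups_py values_section (split_values_groups_py values_section)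

-- ===== LEMMAS AND PROOFS =====

theorem spg_pieces_nil (t : List Char) (prev : Nat) :
    spgPieces t [] prev = [PySem.Chars.strip (t.drop prev)] := by
  simp [spgPieces, PySem.Chars.slice_eq_listSlice, PySem.List.slice_from_natCast]

theorem spg_pieces_cons (t : List Char) (c : Nat) (cs : List Nat) (prev : Nat) :
    spgPieces t (c :: cs) prev
      = PySem.Chars.strip ((t.drop prev).take (c - prev)) :: spgPieces t cs (c + 1) := by
  simp [spgPieces, PySem.Chars.slice_eq_listSlice, PySem.List.slice_natCast]

theorem spg_skipWs_eq_drop : ∀ (l : List Char),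
    spgSkipWs l = l.drop (l.takeWhile PySem.Chars.isspace).length := by
  intro l
  induction l with
  | nil => simp [spgSkipWs]
  | cons c rest ih =>
    by_cases h : PySem.Chars.isspace c
    · simp [spgSkipWs, h, List.takeWhile_cons, ih]
    · simp [spgSkipWs, h, List.takeWhile_cons]

theorem spg_take_len_takeWhile {α : Type} (p : α → Bool) : ∀ (l : List α),
    l.take (l.takeWhile p).length = l.takeWhile p := by
  intro l
  induction l with
  | nil => simp
  | cons c rest ih =>
    by_cases h : p c
    · simp [List.takeWhile_cons, h, ih]
    · simp [List.takeWhile_cons, h]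

theorem spg_strip_ws_append (ws v : List Char) (h : ∀ c ∈ ws, PySem.Chars.isspace c = true) :
    PySem.Chars.strip (ws ++ v) = PySem.Chars.strip v := by
  have hws : List.dropWhile PySem.Chars.isspace ws = [] := by
    rw [List.dropWhile_eq_nil_iff]; exact h
  simp [PySem.Chars.strip, PySem.Chars.lstrip, List.dropWhile_append, hws]

theorem spg_take_ext (t : List Char) (prev i : Nat) (hpi : prev ≤ i) (ch : Char)
    (rest : List Char) (hd : t.drop i = ch :: rest) :
    (t.drop prev).take (i + 1 - prev) = (t.drop prev).take (i - prev) ++ [ch] := by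
  have h0 : t[i]? = some ch := by
    have h := congrArg (fun l => l[0]?) hd
    simpa [List.getElem?_drop] using h
  have h1 : (t.drop prev)[i - prev]? = some ch := by
    rw [List.getElem?_drop]
    have e : prev + (i - prev) = i := by omega
    rw [e, h0]
  have h2 : i + 1 - prev = (i - prev) + 1 := by omega
  rw [h2, List.take_add_one, h1]
  rfl

theorem spg_drop_succ (t : List Char) (i : Nat) (ch : Char) (rest : List Char)
    (hd : t.drop i = ch :: rest) : t.drop (i + 1) = rest := by
  have h : t.drop (i + 1) = (t.drop i).drop 1 := by
    rw [List.drop_drop]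
  rw [h, hd]
  rfl

-- whitespace characters pass through B's scanner without affecting state or cuts
theorem spg_ws_ne (c x : Char) (hsp : PySem.Chars.isspace c = true)
    (hx : PySem.Chars.isspace x = false) : (c == x) = false := by
  rcases hb : c == x with _ | _
  · rfl
  · rw [beq_iff_eq] at hb; subst hb; rw [hsp] at hx; cases hx

-- whitespace characters pass through B's scanner without affecting state or cuts
theorem spg_scanB_skip : ∀ (l : List Char) (i : Nat) (s d : Bool) (dep : Nat),
    spgScanB l i s d dep
      = spgScanB (l.drop (l.takeWhile PySem.Chars.isspace).length)
          (i + (l.takeWhile PySem.Chars.isspace).length) s d dep := by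
  intro l
  induction l with
  | nil => intro i s d dep; simp
  | cons c rest ih =>
    intro i s d dep
    by_cases hsp : PySem.Chars.isspace c
    · have h1 := spg_ws_ne c '\'' hsp (by decide)
      have h2 := spg_ws_ne c '"' hsp (by decide)
      have h3 := spg_ws_ne c '(' hsp (by decide)
      have h4 := spg_ws_ne c ')' hsp (by decide)
      have h5 := spg_ws_ne c ',' hsp (by decide)
      have hstep : spgScanB (c :: rest) i s d dep = spgScanB rest (i + 1) s d dep := by
        simp [spgScanB, h1, h2, h3, h4, h5]
      rw [hstep, ih (i + 1)]
      have harith : (i + 1) + (rest.takeWhile PySem.Chars.isspace).length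
          = i + ((c :: rest).takeWhile PySem.Chars.isspace).length := by
        simp [List.takeWhile_cons, hsp]; omega
      rw [harith]
      simp [List.takeWhile_cons, hsp]
    · simp [List.takeWhile_cons, hsp]

-- A's groups accumulator distributes over append
theorem spg_loopA_append : ∀ (n : Nat) (l : List Char), l.length ≤ n →
    ∀ (s d : Bool) (dep : Nat) (cur : List Char) (gs : List (List Char)),
    spgLoopA l s d dep cur gs = gs ++ spgLoopA l s d dep cur [] := by
  intro n
  induction n with
  | zero =>
    intro l hl s d dep cur gs
    have : l = [] := by cases l <;> simp_all
    subst this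
    simp only [spgLoopA]
    split <;> simp
  | succ n ih =>
    intro l hl s d dep cur gs
    cases l with
    | nil =>
      simp only [spgLoopA]
      split <;> simp
    | cons ch rest =>
      have hr : rest.length ≤ n := by simp at hl; omega
      have hrt : rest.tail.length ≤ n := by
        rw [List.length_tail]; omega
      have hsk : (spgSkipWs rest).length ≤ n := by
        have := spgSkipWs_length_le rest; omega
      simp only [spgLoopA]
      split_ifs <;>
        first
          | (rw [ih rest hr])
          | (rw [ih rest.tail hrt])
          | (simp only [List.nil_append];
             rw [ih (spgSkipWs rest) hsk s d dep [] (gs ++ [PySem.Chars.strip cur]),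
                 ih (spgSkipWs rest) hsk s d dep [] [PySem.Chars.strip cur]];
             simp)

-- the main invariant: A's buffered groups = B's stripped slices between cuts
-- (ws is the whitespace A skipped after the last comma and B keeps in its slice; strip erases it)
theorem spg_main_nil (t : List Char) (i prev : Nat) (ws cur : List Char) (s d : Bool) (dep : Nat)
    (hdrop : t.drop i = []) (hpi : prev ≤ i)
    (htake : (t.drop prev).take (i - prev) = ws ++ cur)
    (hws : ∀ c ∈ ws, PySem.Chars.isspace c = true) :
    (spgLoopA [] s d dep cur []).filter (fun g => !g.isEmpty)
      = (spgPieces t (spgScanB [] i s d dep) prev).filter (fun g => !g.isEmpty) := by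
  have hlen : t.length ≤ i := by rwa [List.drop_eq_nil_iff] at hdrop
  have hall : t.drop prev = ws ++ cur := by
    have hle : (t.drop prev).length ≤ i - prev := by
      simp only [List.length_drop]; omega
    rw [← htake, List.take_of_length_le hle]
  have hstrip : PySem.Chars.strip (t.drop prev) = PySem.Chars.strip cur := by
    rw [hall]; exact spg_strip_ws_append ws cur hws
  rw [show spgScanB [] i s d dep = [] by simp [spgScanB], spg_pieces_nil, hstrip]
  simp only [spgLoopA]
  by_cases hc : cur = []
  · subst hc
    simp [PySem.Chars.strip, PySem.Chars.lstrip, PySem.Chars.rstrip]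
  · rw [if_pos hc]
    simp

theorem spg_main : ∀ (n : Nat) (l : List Char), l.length ≤ n →
    ∀ (t : List Char) (i prev : Nat) (ws cur : List Char) (s d : Bool) (dep : Nat),
    t.drop i = l → prev ≤ i →
    (t.drop prev).take (i - prev) = ws ++ cur →
    (∀ c ∈ ws, PySem.Chars.isspace c = true) →
    (spgLoopA l s d dep cur []).filter (fun g => !g.isEmpty)
      = (spgPieces t (spgScanB l i s d dep) prev).filter (fun g => !g.isEmpty) := by
  intro n
  induction n with
  | zero =>
    intro l hl t i prev ws cur s d dep hdrop hpi htake hws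
    have hnil : l = [] := by cases l <;> simp_all
    subst hnil
    exact spg_main_nil t i prev ws cur s d dep hdrop hpi htake hws
  | succ n ih =>
    intro l hl t i prev ws cur s d dep hdrop hpi htake hws
    cases l with
    | nil => exact spg_main_nil t i prev ws cur s d dep hdrop hpi htake hws
    | cons ch rest =>
      have hlr : rest.length ≤ n := by simp at hl; omega
      have hdrop1 : t.drop (i + 1) = rest := spg_drop_succ t i ch rest hdrop
      have hext : (t.drop prev).take (i + 1 - prev) = ws ++ (cur ++ [ch]) := by
        rw [spg_take_ext t prev i hpi ch rest hdrop, htake, List.append_assoc]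
      simp only [spgLoopA, spgScanB]
      by_cases hc1 : (ch == '\'' && !d) = true
      · rw [if_pos hc1, if_pos hc1]
        by_cases hc2 : (s && rest.head? == some '\'') = true
        · rw [if_pos hc2, if_pos hc2]
          obtain ⟨r2, hrest⟩ : ∃ r2, rest = '\'' :: r2 := by
            cases rest with
            | nil => simp at hc2
            | cons a r2 =>
              simp only [List.head?_cons, Bool.and_eq_true, beq_iff_eq, Option.some.injEq] at hc2
              exact ⟨r2, by rw [hc2.2]⟩
          subst hrest
          have hr2 : r2.length ≤ n := by simp at hlr; omega
          have hdrop2 : t.drop (i + 1 + 1) = r2 := spg_drop_succ t (i + 1) '\'' r2 hdrop1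
          have hext2 : (t.drop prev).take (i + 1 + 1 - prev) = ws ++ (cur ++ [ch, '\'']) := by
            rw [spg_take_ext t prev (i + 1) (by omega) '\'' r2 hdrop1, hext]
            simp
          exact ih r2 hr2 t (i + 1 + 1) prev ws (cur ++ [ch, '\'']) s d dep hdrop2 (by omega) hext2 hws
        · rw [if_neg hc2, if_neg hc2]
          exact ih rest hlr t (i + 1) prev ws (cur ++ [ch]) (!s) d dep hdrop1 (by omega) hext hws
      · rw [if_neg hc1, if_neg hc1]
        by_cases hc3 : (ch == '"' && !s) = true
        · rw [if_pos hc3, if_pos hc3]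
          by_cases hc4 : (d && rest.head? == some '"') = true
          · rw [if_pos hc4, if_pos hc4]
            obtain ⟨r2, hrest⟩ : ∃ r2, rest = '"' :: r2 := by
              cases rest with
              | nil => simp at hc4
              | cons a r2 =>
                simp only [List.head?_cons, Bool.and_eq_true, beq_iff_eq, Option.some.injEq] at hc4
                exact ⟨r2, by rw [hc4.2]⟩
            subst hrest
            have hr2 : r2.length ≤ n := by simp at hlr; omega
            have hdrop2 : t.drop (i + 1 + 1) = r2 := spg_drop_succ t (i + 1) '"' r2 hdrop1
            have hext2 : (t.drop prev).take (i + 1 + 1 - prev) = ws ++ (cur ++ [ch, '"']) := by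
              rw [spg_take_ext t prev (i + 1) (by omega) '"' r2 hdrop1, hext]
              simp
            exact ih r2 hr2 t (i + 1 + 1) prev ws (cur ++ [ch, '"']) s d dep hdrop2 (by omega) hext2 hws
          · rw [if_neg hc4, if_neg hc4]
            exact ih rest hlr t (i + 1) prev ws (cur ++ [ch]) s (!d) dep hdrop1 (by omega) hext hws
        · rw [if_neg hc3, if_neg hc3]
          by_cases hc5 : (!s && !d) = true
          · rw [if_pos hc5, if_pos hc5]
            by_cases hc6 : (ch == '(') = true
            · rw [if_pos hc6, if_pos hc6]
              exact ih rest hlr t (i + 1) prev ws (cur ++ [ch]) s d (dep + 1) hdrop1 (by omega) hext hws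
            · rw [if_neg hc6, if_neg hc6]
              by_cases hc7 : (ch == ')') = true
              · rw [if_pos hc7, if_pos hc7]
                exact ih rest hlr t (i + 1) prev ws (cur ++ [ch]) s d (dep - 1) hdrop1 (by omega) hext hws
              · rw [if_neg hc7, if_neg hc7]
                by_cases hc8 : (ch == ',' && dep == 0) = true
                · rw [if_pos hc8, if_pos hc8]
                  rw [spg_loopA_append n (spgSkipWs rest)
                        (by have := spgSkipWs_length_le rest; omega) s d dep []
                        ([] ++ [PySem.Chars.strip cur])]
                  rw [spg_pieces_cons]
                  have hhead : PySem.Chars.strip ((t.drop prev).take (i - prev))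
                      = PySem.Chars.strip cur := by
                    rw [htake]; exact spg_strip_ws_append ws cur hws
                  rw [hhead]
                  simp only [List.nil_append]
                  have htail : (spgLoopA (spgSkipWs rest) s d dep [] []).filter (fun g => !g.isEmpty)
                      = (spgPieces t (spgScanB rest (i + 1) s d dep) (i + 1)).filter
                          (fun g => !g.isEmpty) := by
                    rw [spg_scanB_skip rest (i + 1) s d dep, spg_skipWs_eq_drop rest]
                    apply ih (rest.drop (rest.takeWhile PySem.Chars.isspace).length)
                        (by simp only [List.length_drop]; omega) t
                        (i + 1 + (rest.takeWhile PySem.Chars.isspace).length) (i + 1)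
                        (rest.takeWhile PySem.Chars.isspace) [] s d dep
                    · rw [← hdrop1, List.drop_drop]
                    · omega
                    · rw [hdrop1]
                      have e : i + 1 + (rest.takeWhile PySem.Chars.isspace).length - (i + 1)
                          = (rest.takeWhile PySem.Chars.isspace).length := by omega
                      rw [e, List.append_nil]
                      exact spg_take_len_takeWhile _ rest
                    · intro c hcmem
                      exact List.mem_takeWhile_imp hcmem
                  simp only [List.singleton_append, List.filter_cons, htail]
                · rw [if_neg hc8, if_neg hc8]
                  exact ih rest hlr t (i + 1) prev ws (cur ++ [ch]) s d dep hdrop1 (by omega) hext hws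
          · rw [if_neg hc5, if_neg hc5]
            exact ih rest hlr t (i + 1) prev ws (cur ++ [ch]) s d dep hdrop1 (by omega) hext hws

-- ===== VERDICT (by name: the statement is the Claim_ definition above) =====
theorem split_values_groups_py_spec : Claim_equal_split_values_groups_py := by
  intro vs _hdom
  unfold Spec_split_values_groups_py split_values_groups_py split_values_groups_py_alt
  exact congrArg (List.map String.ofList)
    (spg_main (spgText vs).length (spgText vs) le_rfl (spgText vs) 0 0 [] [] false false 0
      (by simp) (Nat.le_refl 0) (by simp) (by simp))
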